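-- pv_equiv track=rewrite | github.com/Xenokrat/algo_ex_28 | squirrel.py | squirrel
-- ===== SOURCE A (Python) =====
-- def squirrel(N: int) -> int:
--     res = 1
--
--     for num in range(2, N + 1):
--         res *= num
--         while res % 10 == 0:
--             res //= 10
--
--     while res >= 10:
--         res //= 10
--
--     return res
-- ===== SOURCE B (Python) =====
-- def squirrel(N: int) -> int:
--     # Leading digit of N!.  Trailing-zero stripping never changes the leading
--     # digit, so it is skipped entirely; the factorial is computed by a
--     # divide-and-conquer product over [2..N] (balanced multiplications).
--     def prod_range(lo: int, hi: int) -> int: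
--         if lo > hi:
--             return 1
--         if lo == hi:
--             return lo
--         mid = (lo + hi) // 2
--         return prod_range(lo, mid) * prod_range(mid + 1, hi)
--
--     f = prod_range(2, N)
--     while f >= 10:
--         f //= 10
--     return f
-- ===== Notes on version B (the rewrite author's own statement) =====
-- stated objective: alternative
-- what changed: B drops A's interleaved trailing-zero stripping entirely (stripping powers of 10 cannot change the leading digit) and computes the factorial by a divide-and-conquer balanced product instead of a left-to-right multiply-and-strip loop, then takes the leading digit in one pass.
import Mathlib
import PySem

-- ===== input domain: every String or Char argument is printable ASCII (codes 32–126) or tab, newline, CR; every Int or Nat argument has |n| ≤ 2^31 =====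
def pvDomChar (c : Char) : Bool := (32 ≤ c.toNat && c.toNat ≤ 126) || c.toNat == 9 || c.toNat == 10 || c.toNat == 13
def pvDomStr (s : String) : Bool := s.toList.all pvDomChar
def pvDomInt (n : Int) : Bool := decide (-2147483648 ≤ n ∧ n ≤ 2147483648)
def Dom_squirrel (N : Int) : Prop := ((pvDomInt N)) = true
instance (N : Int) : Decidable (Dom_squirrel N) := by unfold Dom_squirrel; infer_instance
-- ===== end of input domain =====

-- B drops A's interleaved trailing-zero stripping (it cannot change the leading digit)
-- and computes the factorial by a divide-and-conquer balanced product; equal return values proved for all N.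

-- ===== PORT A =====

-- 'while res % 10 == 0: res //= 10', made total with fuel (|x| steps always suffice;
-- Python diverges at res = 0, which A never reaches since res ≥ 1 throughout).
def stripGo : Nat → Int → Int
  | 0, x => x
  | fuel + 1, x =>
    if PySem.Int.mod x 10 = 0 ∧ x ≠ 0 then stripGo fuel (PySem.Int.floordiv x 10) else x

def stripLoop (x : Int) : Int := stripGo x.natAbs x

-- 'while res >= 10: res //= 10', made total with fuel (x.toNat steps always suffice)
def leadGo : Nat → Int → Int
  | 0, x => x
  | fuel + 1, x => if 10 ≤ x then leadGo fuel (PySem.Int.floordiv x 10) else x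

def leadLoop (x : Int) : Int := leadGo x.toNat x

def squirrel (N : Int) : Int :=
  let res := (PySem.List.pyRange 2 (N + 1) 1).foldl
    (fun res num => stripLoop (res * num)) 1
  leadLoop res

-- ===== PORT B =====

-- prod_range(lo, hi): divide-and-conquer product of the integers lo..hi,
-- made total with fuel (interval length + 1 always suffices; each half is strictly shorter)
def prodGo : Nat → Int → Int → Int
  | 0, _, _ => 1
  | fuel + 1, lo, hi =>
    if lo > hi then 1
    else if lo = hi then lo
    else
      prodGo fuel lo (PySem.Int.floordiv (lo + hi) 2) *
        prodGo fuel (PySem.Int.floordiv (lo + hi) 2 + 1) hi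

def prodRange (lo hi : Int) : Int := prodGo ((hi - lo).toNat + 1) lo hi

def squirrel_alt (N : Int) : Int :=
  leadLoop (prodRange 2 N)

-- ===== PRECONDITION & SPEC =====
def Spec_squirrel (N : Int) (out : Int) : Prop := out = squirrel_alt N
instance (N : Int) (out : Int) : Decidable (Spec_squirrel N out) := by unfold Spec_squirrel; infer_instance

-- ===== CLAIM (what is proved, stated in full; the proofs are below) =====
def Claim_equal_squirrel : Prop := ∀ (N : Int), Dom_squirrel N → Spec_squirrel N (squirrel N)

-- ===== LEMMAS AND PROOFS =====

-- with enough fuel, the strip loop only removes factors of 10 and keeps positivity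
theorem stripGo_spec (fuel : Nat) :
    ∀ x : Int, 1 ≤ x → x.toNat ≤ fuel →
      1 ≤ stripGo fuel x ∧ ∃ e : Nat, stripGo fuel x * 10 ^ e = x := by
  induction fuel with
  | zero => intro x hx hf; omega
  | succ fuel ih =>
    intro x hx hf
    by_cases h : PySem.Int.mod x 10 = 0 ∧ x ≠ 0
    · obtain ⟨k, rfl⟩ : (10 : Int) ∣ x := (PySem.Int.mod_eq_zero_iff_dvd x 10).mp h.1
      have hdiv : PySem.Int.floordiv (10 * k) 10 = k := by
        rw [PySem.Int.floordiv_eq_ediv_of_pos (by norm_num),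
          Int.mul_ediv_cancel_left _ (by norm_num)]
      have hk : 1 ≤ k := by nlinarith
      rw [stripGo, if_pos h, hdiv]
      obtain ⟨hpos, e, he⟩ := ih k hk (by omega)
      exact ⟨hpos, e + 1, by rw [pow_succ, ← mul_assoc, he]; ring⟩
    · rw [stripGo, if_neg h]
      exact ⟨hx, 0, by ring⟩

theorem stripLoop_spec (x : Int) (hx : 1 ≤ x) :
    1 ≤ stripLoop x ∧ ∃ e : Nat, stripLoop x * 10 ^ e = x :=
  stripGo_spec x.natAbs x hx (by omega)

-- the lead loop's result does not depend on the fuel, once the fuel is sufficient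
theorem leadGo_congr (fuel : Nat) :
    ∀ (g : Nat) (x : Int), x.toNat ≤ fuel → x.toNat ≤ g →
      leadGo fuel x = leadGo g x := by
  induction fuel with
  | zero =>
    intro g x hf hg
    have hx : ¬ (10 ≤ x) := by omega
    cases g with
    | zero => rfl
    | succ g => rw [leadGo, leadGo, if_neg hx]
  | succ fuel ih =>
    intro g x hf hg
    by_cases h : 10 ≤ x
    · have hdiv : PySem.Int.floordiv x 10 = x / 10 :=
        PySem.Int.floordiv_eq_ediv_of_pos (by norm_num)
      cases g with
      | zero => omega
      | succ g =>
        rw [leadGo, leadGo, if_pos h, if_pos h]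
        exact ih g _ (by rw [hdiv]; omega) (by rw [hdiv]; omega)
    · cases g with
      | zero => rw [leadGo]; cases fuel <;> rw [leadGo, if_neg h]
      | succ g => rw [leadGo, leadGo, if_neg h, if_neg h]

-- leading digit is unchanged by one appended zero
theorem leadLoop_mul_ten (x : Int) (hx : 1 ≤ x) :
    leadLoop (x * 10) = leadLoop x := by
  unfold leadLoop
  have h10 : (10 : Int) ≤ x * 10 := by nlinarith
  have hxx : x.toNat + 1 ≤ (x * 10).toNat := by
    have : x + 1 ≤ x * 10 := by nlinarith
    omega
  obtain ⟨m, hm⟩ : ∃ m, (x * 10).toNat = m + 1 := ⟨(x * 10).toNat - 1, by omega⟩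
  rw [hm, leadGo, if_pos h10, PySem.Int.floordiv_eq_ediv_of_pos (by norm_num),
    Int.mul_ediv_cancel _ (by norm_num)]
  exact leadGo_congr m x.toNat x (by omega) le_rfl

theorem leadLoop_mul_pow (x : Int) (hx : 1 ≤ x) (e : Nat) :
    leadLoop (x * 10 ^ e) = leadLoop x := by
  induction e with
  | zero => simp
  | succ e ih =>
    have h1 : (1 : Int) ≤ x * 10 ^ e := by
      have := one_le_pow₀ (by norm_num : (1 : Int) ≤ 10) (n := e)
      nlinarith
    calc leadLoop (x * 10 ^ (e + 1)) = leadLoop (x * 10 ^ e * 10) := by ring_nf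
      _ = leadLoop (x * 10 ^ e) := leadLoop_mul_ten _ h1
      _ = leadLoop x := ih

-- A's multiply-and-strip fold differs from the plain product fold by a power of 10
theorem stripFold_spec (l : List Int) (hl : ∀ x ∈ l, 1 ≤ x) :
    ∀ a : Int, 1 ≤ a →
      1 ≤ l.foldl (fun r n => stripLoop (r * n)) a ∧
      ∃ e : Nat, (l.foldl (fun r n => stripLoop (r * n)) a) * 10 ^ e =
        l.foldl (· * ·) a := by
  induction l with
  | nil => intro a ha; exact ⟨ha, 0, by simp⟩
  | cons x t ih =>
    intro a ha
    have hx : 1 ≤ x := hl x (by simp)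
    have hax : 1 ≤ a * x := by nlinarith
    obtain ⟨hpos, e1, he1⟩ := stripLoop_spec (a * x) hax
    obtain ⟨hpos2, e2, he2⟩ :=
      ih (fun y hy => hl y (by simp [hy])) (stripLoop (a * x)) hpos
    refine ⟨by simpa using hpos2, ?_⟩
    -- pulling a power of 10 out of the accumulator of a product fold
    have key : ∀ (t : List Int) (b : Int) (e : Nat),
        t.foldl (· * ·) (b * 10 ^ e) = (t.foldl (· * ·) b) * 10 ^ e := by
      intro t
      induction t with
      | nil => intro b e; simp
      | cons y s ihs => intro b e; simpa [mul_right_comm] using ihs (b * y) e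
    refine ⟨e2 + e1, ?_⟩
    simp only [List.foldl_cons]
    rw [pow_add, ← mul_assoc, he2, ← key, he1]

-- with enough fuel, B's divide-and-conquer product equals the plain left-fold product
theorem prodGo_eq (fuel : Nat) :
    ∀ lo hi : Int, (hi - lo).toNat < fuel →
      prodGo fuel lo hi = (PySem.List.pyRange lo (hi + 1) 1).foldl (· * ·) 1 := by
  induction fuel with
  | zero => intro lo hi h; omega
  | succ fuel ih =>
    intro lo hi h
    by_cases h1 : lo > hi
    · rw [prodGo, if_pos h1, PySem.List.pyRange_one_eq_nil (by omega)]
      simp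
    · by_cases h2 : lo = hi
      · subst h2
        rw [prodGo, if_neg h1, if_pos rfl, PySem.List.pyRange_one_singleton]
        simp
      · have hlt : lo < hi := by omega
        have hdiv : PySem.Int.floordiv (lo + hi) 2 = (lo + hi) / 2 :=
          PySem.Int.floordiv_eq_ediv_of_pos (by norm_num)
        rw [prodGo, if_neg h1, if_neg h2,
          ih lo (PySem.Int.floordiv (lo + hi) 2) (by rw [hdiv]; omega),
          ih (PySem.Int.floordiv (lo + hi) 2 + 1) hi (by rw [hdiv]; omega),
          PySem.List.pyRange_one_append lo (PySem.Int.floordiv (lo + hi) 2 + 1) (hi + 1)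
            (by rw [hdiv]; omega) (by rw [hdiv]; omega),
          List.foldl_append]
        -- pull the initial accumulator out of the second fold
        have key : ∀ (t : List Int) (b : Int),
            t.foldl (· * ·) b = b * t.foldl (· * ·) 1 := by
          intro t
          induction t with
          | nil => intro b; simp
          | cons y s ihs =>
            intro b
            simp only [List.foldl_cons]
            rw [ihs (b * y), ihs (1 * y)]
            ring
        rw [key _ ((PySem.List.pyRange lo
          (PySem.Int.floordiv (lo + hi) 2 + 1) 1).foldl (· * ·) 1)]

theorem prodRange_eq (lo hi : Int) :
    prodRange lo hi = (PySem.List.pyRange lo (hi + 1) 1).foldl (· * ·) 1 :=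
  prodGo_eq ((hi - lo).toNat + 1) lo hi (by omega)

-- ===== VERDICT (by name: the statement is the Claim_ definition above) =====
theorem squirrel_spec : Claim_equal_squirrel := by
  intro N _
  unfold Spec_squirrel squirrel squirrel_alt
  have hmem : ∀ x ∈ PySem.List.pyRange 2 (N + 1) 1, (1 : Int) ≤ x := by
    intro x hx
    have := (PySem.List.mem_pyRange_one).mp hx
    omega
  obtain ⟨hpos, e, he⟩ :=
    stripFold_spec (PySem.List.pyRange 2 (N + 1) 1) hmem 1 le_rfl
  rw [prodRange_eq, ← he, leadLoop_mul_pow _ hpos]
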